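-- pv_equiv track=rewrite | github.com/EaiDaaGonaCry/wordle_py | settings/Logic.py | colour_value_helper
-- ===== SOURCE A (Python) =====
-- from typing import List, Tuple, Dict, Optional, Any, Set
--
-- def colour_value_helper(triplets: List[Tuple[str, int, str]]) -> int:
--     """Calculates a score for a pattern (used in Extreme mode)."""
--     score = 0
--     for item in triplets:
--         colour = item[2]
--         if colour == 'g':
--             score += 3
--         if colour == 'y':
--             score += 1
--     return score
-- ===== SOURCE B (Python) =====
-- from typing import List, Tuple
--
-- _SCORES = {'g': 3, 'y': 1}
--
-- def colour_value_helper(triplets: List[Tuple[str, int, str]]) -> int: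
--     """Divide-and-conquer: recursively split the index range in half and
--     add the two halves' scores; a single element's score comes from a
--     lookup table instead of branching."""
--     def go(lo: int, hi: int) -> int:
--         if hi - lo == 0:
--             return 0
--         if hi - lo == 1:
--             return _SCORES.get(triplets[lo][2], 0)
--         mid = (lo + hi) // 2
--         return go(lo, mid) + go(mid, hi)
--     return go(0, len(triplets))
-- ===== Notes on version B (the rewrite author's own statement) =====
-- stated objective: alternative
-- what changed: Replaces the left-to-right branching accumulator with a divide-and-conquer recursion that splits the index range in half and scores a single element via a lookup table, summing the halves.
import Mathlib
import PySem

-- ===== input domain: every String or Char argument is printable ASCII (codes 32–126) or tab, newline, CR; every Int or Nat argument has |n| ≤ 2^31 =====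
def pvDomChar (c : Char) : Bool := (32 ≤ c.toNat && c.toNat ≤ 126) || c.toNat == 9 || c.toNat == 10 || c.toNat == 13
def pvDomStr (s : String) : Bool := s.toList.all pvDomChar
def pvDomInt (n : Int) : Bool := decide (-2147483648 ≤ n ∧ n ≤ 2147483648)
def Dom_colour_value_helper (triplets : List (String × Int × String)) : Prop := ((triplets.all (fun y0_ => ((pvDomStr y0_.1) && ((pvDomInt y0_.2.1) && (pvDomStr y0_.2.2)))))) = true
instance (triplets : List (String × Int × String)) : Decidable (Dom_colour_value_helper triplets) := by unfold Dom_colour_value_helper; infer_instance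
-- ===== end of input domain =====

-- B replaces A's left-to-right branching accumulator with a divide-and-conquer recursion over index ranges, scoring single elements through a lookup table (objective: alternative).

-- ===== PORT A =====
def colour_value_helper (triplets : List (String × Int × String)) : Int :=
  triplets.foldl (fun score item =>
    let colour := item.2.2
    let score := if colour = "g" then score + 3 else score
    if colour = "y" then score + 1 else score) 0

-- ===== PORT B =====
def cvhScores : PySem.Dict String Int := PySem.Dict.ofList [("g", 3), ("y", 1)]

def cvhGo (triplets : List (String × Int × String)) (lo hi : Nat) : Int :=
  if hi - lo = 0 then 0
  else if hi - lo = 1 then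
    -- triplets[lo]: go is only ever called with lo < hi ≤ len, so the index is in range
    match PySem.List.pyGet? triplets (lo : Int) with
    | some item => cvhScores.getD item.2.2 0
    | none => 0
  else
    cvhGo triplets lo ((lo + hi) / 2) + cvhGo triplets ((lo + hi) / 2) hi
termination_by hi - lo
decreasing_by all_goals omega

def colour_value_helper_alt (triplets : List (String × Int × String)) : Int :=
  cvhGo triplets 0 triplets.length

-- ===== PRECONDITION & SPEC =====
def Spec_colour_value_helper (triplets : List (String × Int × String)) (out : Int) : Prop := out = colour_value_helper_alt triplets
instance (triplets : List (String × Int × String)) (out : Int) : Decidable (Spec_colour_value_helper triplets out) := by unfold Spec_colour_value_helper; infer_instance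

-- ===== CLAIM (what is proved, stated in full; the proofs are below) =====
def Claim_equal_colour_value_helper : Prop := ∀ (triplets : List (String × Int × String)), Dom_colour_value_helper triplets → Spec_colour_value_helper triplets (colour_value_helper triplets)

-- ===== LEMMAS AND PROOFS =====

-- per-element score of a triplet, shared spec for both sides
def cvhVal (item : String × Int × String) : Int := cvhScores.getD item.2.2 0

theorem cvhVal_eq (item : String × Int × String) :
    cvhVal item = (if item.2.2 = "y" then (if item.2.2 = "g" then (3:Int) else 0) + 1
                   else if item.2.2 = "g" then 3 else 0) := by
  unfold cvhVal
  by_cases hg : item.2.2 = "g"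
  · rw [hg]; decide
  · by_cases hy : item.2.2 = "y"
    · rw [hy]; decide
    · have hg' : ¬ ("g" = item.2.2) := fun h => hg h.symm
      have hy' : ¬ ("y" = item.2.2) := fun h => hy h.symm
      have hmk : cvhScores = PySem.Dict.mk [("g", 3), ("y", 1)] := by decide
      simp [hmk, PySem.Dict.getD, PySem.Dict.get?_mk_cons, PySem.Dict.get?, hg, hy, hg', hy']

theorem cvh_foldl_shift (ts : List (String × Int × String)) (s : Int) :
    ts.foldl (fun score item =>
      let colour := item.2.2
      let score := if colour = "g" then score + 3 else score
      if colour = "y" then score + 1 else score) s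
    = s + (ts.map cvhVal).sum := by
  induction ts generalizing s with
  | nil => simp
  | cons h t ih =>
    simp only [List.foldl_cons, ih, List.map_cons, List.sum_cons, cvhVal_eq]
    by_cases hg : h.2.2 = "g" <;> by_cases hy : h.2.2 = "y" <;> simp [hg, hy] <;> ring

theorem cvhGo_eq (ts : List (String × Int × String)) :
    ∀ n lo hi, hi - lo = n → lo ≤ hi → hi ≤ ts.length →
      cvhGo ts lo hi = (((ts.drop lo).take (hi - lo)).map cvhVal).sum := by
  intro n
  induction n using Nat.strong_induction_on with
  | _ n ih =>
    intro lo hi hn hle hlen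
    rw [cvhGo]
    by_cases h0 : hi - lo = 0
    · simp [h0]
    · by_cases h1 : hi - lo = 1
      · have hlt : lo < ts.length := by omega
        simp only [h1, if_true, PySem.List.pyGet?_natCast, List.getElem?_eq_getElem hlt]
        have : (ts.drop lo).take 1 = [ts[lo]] := by
          rw [List.take_one, List.head?_drop, List.getElem?_eq_getElem hlt]; rfl
        simp [this, cvhVal]
      · have hmid1 : lo < (lo + hi) / 2 := by omega
        have hmid2 : (lo + hi) / 2 < hi := by omega
        simp only [h0, h1, if_false]
        rw [ih ((lo + hi) / 2 - lo) (by omega) lo ((lo + hi) / 2) rfl (Nat.le_of_lt hmid1) (by omega),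
            ih (hi - (lo + hi) / 2) (by omega) ((lo + hi) / 2) hi rfl (Nat.le_of_lt hmid2) hlen]
        have hsplit : (ts.drop lo).take (hi - lo)
            = (ts.drop lo).take ((lo + hi) / 2 - lo)
              ++ (ts.drop ((lo + hi) / 2)).take (hi - (lo + hi) / 2) := by
          have : hi - lo = ((lo + hi) / 2 - lo) + (hi - (lo + hi) / 2) := by omega
          have hm : lo + ((lo + hi) / 2 - lo) = (lo + hi) / 2 := by omega
          rw [this, List.take_add, List.drop_drop, hm]
        rw [hsplit, List.map_append, List.sum_append]

-- ===== VERDICT (by name: the statement is the Claim_ definition above) =====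
theorem colour_value_helper_spec : Claim_equal_colour_value_helper := by
  intro ts _
  unfold Spec_colour_value_helper colour_value_helper colour_value_helper_alt
  rw [cvh_foldl_shift, cvhGo_eq ts ts.length 0 ts.length rfl (Nat.zero_le _) le_rfl]
  simp
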